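-- pv_equiv track=rewrite | github.com/981377660LMT/algorithm-study | 17_模式匹配/LCP/getLCP.py | getLCP
-- ===== SOURCE A (Python) =====
-- from typing import List
--
-- def getLCP(s: str) -> List[List[int]]:
--     """O(n^2) dp 求解 两个后缀的 LCP
--
--     Args:
--         s (str): 输入字符串
--     Returns:
--         List[List[int]]: LCP[i][j] 表示后缀 s[i:] 和 s[j:] 的最长公共前缀
--     """
--     n = len(s)
--     lcp = [[0] * (n + 1) for _ in range(n + 1)]
--     for i in range(n - 1, -1, -1):
--         for j in range(n - 1, -1, -1):
--             if s[i] == s[j]: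
--                 lcp[i][j] = lcp[i + 1][j + 1] + 1
--     return lcp
-- ===== SOURCE B (Python) =====
-- def getLCP(s):
--     n = len(s)
--
--     def cp(i, j):
--         k = 0
--         while i + k < n and j + k < n and s[i + k] == s[j + k]:
--             k += 1
--         return k
--
--     return [[cp(i, j) for j in range(n + 1)] for i in range(n + 1)]
-- ===== Notes on version B (the rewrite author's own statement) =====
-- stated objective: alternative
-- what changed: Replaces the backward dynamic-programming table fill (lcp[i][j] = lcp[i+1][j+1]+1) by building each cell independently with a direct forward scan that counts matching characters of the two suffixes; the zero border arises naturally since the scan returns 0 at index n.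
import Mathlib
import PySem

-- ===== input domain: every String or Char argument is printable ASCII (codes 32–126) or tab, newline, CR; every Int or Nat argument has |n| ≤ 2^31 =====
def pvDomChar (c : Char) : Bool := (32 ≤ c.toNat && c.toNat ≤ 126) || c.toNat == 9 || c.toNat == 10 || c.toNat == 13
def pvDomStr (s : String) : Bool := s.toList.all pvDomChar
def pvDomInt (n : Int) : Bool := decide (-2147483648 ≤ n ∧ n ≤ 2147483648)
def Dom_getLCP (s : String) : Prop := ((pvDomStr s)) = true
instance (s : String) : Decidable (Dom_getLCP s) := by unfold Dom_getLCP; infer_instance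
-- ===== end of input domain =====

-- B replaces the backward DP recurrence lcp[i][j] = lcp[i+1][j+1] + 1 by an independent
-- forward character-count per cell (alternative decomposition; not claimed faster).

-- ===== PORT A =====
-- lcp[i][j] read; both indices are always in range in A's uses, so the default 0 is never taken
def pvGetCell (m : List (List Int)) (i j : Int) : Int :=
  PySem.List.pyGetD (PySem.List.pyGetD m i []) j 0

-- lcp[i][j] = v ; indices are loop counters 0 ≤ i,j < n, so .toNat is exact here
def pvSetCell (m : List (List Int)) (i j : Int) (v : Int) : List (List Int) :=
  m.set i.toNat ((m.getD i.toNat []).set j.toNat v)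

def getLCP (s : String) : List (List Int) :=
  let cs := s.toList
  let n : Int := cs.length
  let lcp0 := List.replicate (n + 1).toNat (List.replicate (n + 1).toNat (0 : Int))
  (PySem.List.pyRange (n - 1) (-1) (-1)).foldl (fun lcp i =>
    (PySem.List.pyRange (n - 1) (-1) (-1)).foldl (fun lcp j =>
      if PySem.List.pyGet? cs i = PySem.List.pyGet? cs j then
        pvSetCell lcp i j (pvGetCell lcp (i + 1) (j + 1) + 1)
      else lcp) lcp) lcp0

-- ===== PORT B =====
-- the while loop of cp(i, j): k counts matching characters of the suffixes s[i:] and s[j:]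
def pvCp (cs : List Char) (n i j k : Nat) : Nat :=
  if h : i + k < n ∧ j + k < n ∧ cs[i + k]? = cs[j + k]? then
    pvCp cs n i j (k + 1)
  else k
termination_by n - (i + k)
decreasing_by omega

def getLCP_alt (s : String) : List (List Int) :=
  let cs := s.toList
  let n := cs.length
  (List.range (n + 1)).map fun i =>
    (List.range (n + 1)).map fun j => (pvCp cs n i j 0 : Int)

-- ===== PRECONDITION & SPEC =====
def Spec_getLCP (s : String) (out : List (List Int)) : Prop := out = getLCP_alt s
instance (s : String) (out : List (List Int)) : Decidable (Spec_getLCP s out) := by unfold Spec_getLCP; infer_instance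

-- ===== CLAIM (what is proved, stated in full; the proofs are below) =====
def Claim_equal_getLCP : Prop := ∀ (s : String), Dom_getLCP s → Spec_getLCP s (getLCP s)

-- ===== LEMMAS AND PROOFS =====

-- length of the common prefix of two suffixes, the value both programs compute
def pvG : List Char → List Char → Nat
  | a :: as, b :: bs => if a = b then pvG as bs + 1 else 0
  | _, _ => 0

lemma pvG_nil_left (ys : List Char) : pvG [] ys = 0 := by cases ys <;> rfl

lemma pvG_nil_right (xs : List Char) : pvG xs [] = 0 := by cases xs <;> rfl

lemma pvG_drop (cs : List Char) (i j : Nat) (hi : i < cs.length) (hj : j < cs.length) :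
    pvG (cs.drop i) (cs.drop j) =
      if cs[i] = cs[j] then pvG (cs.drop (i + 1)) (cs.drop (j + 1)) + 1 else 0 := by
  rw [List.drop_eq_getElem_cons hi, List.drop_eq_getElem_cons hj]
  rfl

lemma pvCp_eq_pvG (cs : List Char) (i j k : Nat) :
    pvCp cs cs.length i j k = k + pvG (cs.drop (i + k)) (cs.drop (j + k)) := by
  fun_induction pvCp cs cs.length i j k with
  | case1 k h ih =>
    obtain ⟨h1, h2, h3⟩ := h
    rw [ih, pvG_drop cs (i + k) (j + k) h1 h2]
    have : cs[i + k] = cs[j + k] := by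
      have := h3
      simp [h1, h2] at this
      exact this
    have e1 : i + (k + 1) = i + k + 1 := by omega
    have e2 : j + (k + 1) = j + k + 1 := by omega
    rw [e1, e2] at *
    simp [this]
    omega
  | case2 k h =>
    push Not at h
    rcases Nat.lt_or_ge (i + k) cs.length with h1 | h1
    · rcases Nat.lt_or_ge (j + k) cs.length with h2 | h2
      · have h3 := h h1 h2
        rw [pvG_drop cs (i + k) (j + k) h1 h2]
        have : ¬ cs[i + k] = cs[j + k] := by
          intro he; exact h3 (by simp [h1, h2, he])
        simp [this]
      · rw [List.drop_eq_nil_of_le h2, pvG_nil_right]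
        omega
    · rw [List.drop_eq_nil_of_le h1, pvG_nil_left]
      omega

-- target row i of the finished table
def pvT (cs : List Char) (i : Nat) : List Int :=
  (List.range (cs.length + 1)).map fun j => (pvG (cs.drop i) (cs.drop j) : Int)

-- row i while the inner loop still has indices < u to process
def pvP (cs : List Char) (i u : Nat) : List Int :=
  (List.range (cs.length + 1)).map fun j =>
    if u ≤ j then (pvG (cs.drop i) (cs.drop j) : Int) else 0

-- matrix state before the outer loop processes index t - 1
def pvM (cs : List Char) (t : Nat) : List (List Int) :=
  (List.range (cs.length + 1)).map fun r =>
    if t ≤ r then pvT cs r else List.replicate (cs.length + 1) (0 : Int)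

-- matrix state while the inner loop for row i still has indices < u to process
def pvMP (cs : List Char) (i u : Nat) : List (List Int) :=
  (List.range (cs.length + 1)).map fun r =>
    if i < r then pvT cs r
    else if r = i then pvP cs i u
    else List.replicate (cs.length + 1) (0 : Int)

lemma pvT_top (cs : List Char) : pvT cs cs.length = List.replicate (cs.length + 1) 0 := by
  apply List.ext_getElem (by simp [pvT])
  intro j h1 h2
  simp [pvT, List.drop_length, pvG_nil_left]

lemma pvP_top (cs : List Char) (i : Nat) :
    pvP cs i cs.length = List.replicate (cs.length + 1) 0 := by
  apply List.ext_getElem (by simp [pvP])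
  intro j h1 h2
  simp only [pvP] at h1
  simp only [pvP, List.getElem_map, List.getElem_range, List.getElem_replicate]
  split_ifs with h
  · have hj : j = cs.length := by simp at h1; omega
    subst hj
    simp [List.drop_length, pvG_nil_right]
  · rfl

lemma pvP_zero (cs : List Char) (i : Nat) : pvP cs i 0 = pvT cs i := by
  simp [pvP, pvT]

lemma pvMP_top (cs : List Char) (i : Nat) : pvMP cs i cs.length = pvM cs (i + 1) := by
  apply List.ext_getElem (by simp [pvMP, pvM])
  intro r h1 h2
  simp only [pvMP, pvM, List.getElem_map, List.getElem_range]
  by_cases ha : i < r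
  · rw [if_pos ha, if_pos (by omega)]
  · by_cases hb : r = i
    · subst hb; rw [if_neg ha, if_pos rfl, pvP_top, if_neg (by omega)]
    · rw [if_neg ha, if_neg hb, if_neg (by omega)]

lemma pvMP_zero (cs : List Char) (i : Nat) : pvMP cs i 0 = pvM cs i := by
  apply List.ext_getElem (by simp [pvMP, pvM])
  intro r h1 h2
  simp only [pvMP, pvM, List.getElem_map, List.getElem_range]
  by_cases ha : i < r
  · rw [if_pos ha, if_pos (by omega)]
  · by_cases hb : r = i
    · subst hb; rw [if_neg ha, if_pos rfl, pvP_zero, if_pos (by omega)]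
    · rw [if_neg ha, if_neg hb, if_neg (by omega)]

lemma pvGetCell_MP (cs : List Char) (i u v : Nat) (hi : i < cs.length) (hu : u < cs.length) :
    pvGetCell (pvMP cs i v) ((i : Int) + 1) ((u : Int) + 1) =
      (pvG (cs.drop (i + 1)) (cs.drop (u + 1)) : Int) := by
  have e1 : ((i : Int) + 1) = ((i + 1 : Nat) : Int) := by push_cast; ring
  have e2 : ((u : Int) + 1) = ((u + 1 : Nat) : Int) := by push_cast; ring
  rw [pvGetCell, e1, e2, PySem.List.pyGetD_natCast, PySem.List.pyGetD_natCast]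
  have h1 : i + 1 < cs.length + 1 := by omega
  have h2 : u + 1 < cs.length + 1 := by omega
  simp [pvMP, pvT, List.getD_eq_getElem?_getD, h1, h2]

lemma pvInnerStep (cs : List Char) (i u : Nat) (hi : i < cs.length) (hu : u < cs.length) :
    (if PySem.List.pyGet? cs (i : Int) = PySem.List.pyGet? cs (u : Int) then
       pvSetCell (pvMP cs i (u + 1)) (i : Int) (u : Int)
         (pvGetCell (pvMP cs i (u + 1)) ((i : Int) + 1) ((u : Int) + 1) + 1)
     else pvMP cs i (u + 1)) = pvMP cs i u := by
  have hgi : PySem.List.pyGet? cs (i : Int) = some cs[i] := by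
    simp [pysem, hi]
  have hgu : PySem.List.pyGet? cs (u : Int) = some cs[u] := by
    simp [pysem, hu]
  rw [hgi, hgu, pvGetCell_MP cs i u (u + 1) hi hu]
  by_cases hc : cs[i] = cs[u]
  · rw [if_pos (show some cs[i] = some cs[u] by rw [hc])]
    have hrow : (pvMP cs i (u + 1)).getD (Int.toNat i) [] = pvP cs i (u + 1) := by
      simp [pvMP, List.getD_eq_getElem?_getD, Nat.lt_succ_of_lt hi]
    have hv : (pvG (cs.drop (i + 1)) (cs.drop (u + 1)) : Int) + 1 =
        (pvG (cs.drop i) (cs.drop u) : Int) := by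
      rw [pvG_drop cs i u hi hu, if_pos hc]; push_cast; ring
    rw [pvSetCell, hrow, hv]
    have hrow' : (pvP cs i (u + 1)).set (Int.toNat u) (pvG (cs.drop i) (cs.drop u) : Int) =
        pvP cs i u := by
      apply List.ext_getElem (by simp [pvP])
      intro j h1 h2
      have hj : j < cs.length + 1 := by simpa [pvP] using h2
      simp only [pvP, List.getElem_set, List.getElem_map, List.getElem_range,
        Int.toNat_natCast]
      by_cases hju : u = j
      · subst hju; simp
      · rw [if_neg hju]
        split_ifs with h3 h4 <;> first | rfl | omega
    rw [hrow']
    apply List.ext_getElem (by simp [pvMP])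
    intro r h1 h2
    simp only [List.getElem_set, Int.toNat_natCast, pvMP, List.getElem_map,
      List.getElem_range]
    by_cases hri : i = r
    · subst hri; simp
    · have hri' : ¬ r = i := fun h => hri h.symm
      rw [if_neg hri]
      by_cases ha : i < r
      · rw [if_pos ha, if_pos ha]
      · rw [if_neg ha, if_neg ha, if_neg hri', if_neg hri']
  · have : ¬ (some cs[i] = some cs[u]) := by simpa using hc
    rw [if_neg this]
    apply List.ext_getElem (by simp [pvMP])
    intro r h1 h2
    simp only [pvMP, List.getElem_map, List.getElem_range]
    split_ifs with ha hb <;> try rfl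
    apply List.ext_getElem (by simp [pvP])
    intro j h3 h4
    simp only [pvP, List.getElem_map, List.getElem_range]
    split_ifs with hx hy <;> try rfl
    · omega
    · have hj : j = u := by omega
      subst hj
      rw [pvG_drop cs i j hi hu, if_neg hc]
      rfl

lemma pvInnerFold (cs : List Char) (i : Nat) (hi : i < cs.length) :
    ∀ u, u ≤ cs.length →
    (PySem.List.pyRange ((u : Int) - 1) (-1) (-1)).foldl
      (fun lcp j =>
        if PySem.List.pyGet? cs (i : Int) = PySem.List.pyGet? cs j then
          pvSetCell lcp (i : Int) j (pvGetCell lcp ((i : Int) + 1) (j + 1) + 1)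
        else lcp)
      (pvMP cs i u) = pvMP cs i 0 := by
  intro u
  induction u with
  | zero =>
    intro _
    norm_num [PySem.List.pyRange_neg_one_eq_nil]
  | succ u ih =>
    intro hu
    have h1 : ((u + 1 : Nat) : Int) - 1 = (u : Int) := by push_cast; ring
    rw [h1, PySem.List.pyRange_neg_one_cons (by omega : (-1 : Int) < (u : Nat)),
      List.foldl_cons, pvInnerStep cs i u hi (by omega)]
    exact ih (by omega)

lemma pvOuterFold (cs : List Char) :
    ∀ t, t ≤ cs.length →
    (PySem.List.pyRange ((t : Int) - 1) (-1) (-1)).foldl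
      (fun lcp i =>
        (PySem.List.pyRange ((cs.length : Int) - 1) (-1) (-1)).foldl
          (fun lcp j =>
            if PySem.List.pyGet? cs i = PySem.List.pyGet? cs j then
              pvSetCell lcp i j (pvGetCell lcp (i + 1) (j + 1) + 1)
            else lcp) lcp)
      (pvM cs t) = pvM cs 0 := by
  intro t
  induction t with
  | zero =>
    intro _
    norm_num [PySem.List.pyRange_neg_one_eq_nil]
  | succ t ih =>
    intro ht
    have h1 : ((t + 1 : Nat) : Int) - 1 = (t : Int) := by push_cast; ring
    rw [h1, PySem.List.pyRange_neg_one_cons (by omega : (-1 : Int) < (t : Nat)),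
      List.foldl_cons, ← pvMP_top cs t, pvInnerFold cs t (by omega) cs.length le_rfl,
      pvMP_zero]
    exact ih (by omega)

lemma pvM_top (cs : List Char) :
    pvM cs cs.length = List.replicate (cs.length + 1) (List.replicate (cs.length + 1) 0) := by
  apply List.ext_getElem (by simp [pvM])
  intro r h1 h2
  have hr : r < cs.length + 1 := by simpa [pvM] using h1
  simp only [pvM, List.getElem_map, List.getElem_range, List.getElem_replicate]
  by_cases h : cs.length ≤ r
  · have : r = cs.length := by omega
    subst this
    rw [if_pos le_rfl, pvT_top]
  · rw [if_neg h]

lemma pvAlt_eq (s : String) : getLCP_alt s = pvM s.toList 0 := by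
  simp only [getLCP_alt, pvM, pvT, Nat.zero_le, if_pos]
  apply List.map_congr_left
  intro i _
  apply List.map_congr_left
  intro j _
  rw [pvCp_eq_pvG]
  simp

theorem getLCP_spec : Claim_equal_getLCP := by
  intro s _
  unfold Spec_getLCP
  show getLCP s = getLCP_alt s
  have hn : ((s.toList.length : Int) + 1).toNat = s.toList.length + 1 := by omega
  show (PySem.List.pyRange ((s.toList.length : Int) - 1) (-1) (-1)).foldl
      (fun lcp i =>
        (PySem.List.pyRange ((s.toList.length : Int) - 1) (-1) (-1)).foldl
          (fun lcp j =>
            if PySem.List.pyGet? s.toList i = PySem.List.pyGet? s.toList j then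
              pvSetCell lcp i j (pvGetCell lcp (i + 1) (j + 1) + 1)
            else lcp) lcp)
      (List.replicate ((s.toList.length : Int) + 1).toNat
        (List.replicate ((s.toList.length : Int) + 1).toNat 0)) = getLCP_alt s
  rw [hn, ← pvM_top s.toList, pvOuterFold s.toList s.toList.length le_rfl, pvAlt_eq]
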